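-- pv_equiv track=rewrite | github.com/HLWiencko/bioinf-helper-scripts | scratchPad/fastaPlot/findLongest.py | makeFasta
-- ===== SOURCE A (Python) =====
-- def makeFasta(label, sequence):
--     # takes a name and a sequence and returns a list [>label, seq1, seq2, seq3]
--     fasta = []
--     label = '>' + label
--     fasta.append(label)
--
--     buf = ''
--     for l in sequence:
--         if len(buf) < 60:
--             buf += l
--         else:
--             fasta.append(buf)
--             buf = ''
--     fasta.append(buf)
--     return fasta
-- ===== SOURCE B (Python) =====
-- def makeFasta(label, sequence):
--     # Index-based slicing instead of a per-character accumulator loop.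
--     # The original flushes a full 60-char buffer when the NEXT character
--     # arrives and drops that character, so successive lines start 61 apart;
--     # the tail (including a possible trailing empty string) is appended as is.
--     fasta = ['>' + label]
--     i = 0
--     while i + 60 < len(sequence):
--         fasta.append(sequence[i:i + 60])
--         i += 61
--     fasta.append(sequence[i:])
--     return fasta
-- ===== Notes on version B (the rewrite author's own statement) =====
-- stated objective: simpler
-- what changed: Replaces the per-character buffer-accumulator loop with an index-based while loop that slices the sequence directly (step 61, reproducing the character the original drops after each full 60-char line, and the possibly-empty tail).
import Mathlib
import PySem

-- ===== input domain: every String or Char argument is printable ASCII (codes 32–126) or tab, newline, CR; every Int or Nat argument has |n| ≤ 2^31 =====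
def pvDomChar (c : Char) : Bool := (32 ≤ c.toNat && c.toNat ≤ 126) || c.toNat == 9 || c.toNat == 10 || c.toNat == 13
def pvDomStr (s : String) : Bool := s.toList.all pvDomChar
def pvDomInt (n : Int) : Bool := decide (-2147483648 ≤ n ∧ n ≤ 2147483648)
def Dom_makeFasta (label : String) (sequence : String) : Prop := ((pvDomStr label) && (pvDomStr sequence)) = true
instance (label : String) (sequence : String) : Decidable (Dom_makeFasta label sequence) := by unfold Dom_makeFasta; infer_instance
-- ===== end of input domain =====

-- B replaces A's per-character accumulator loop by an index-based slicing loop (step 61); same return value; objective: simpler.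

-- ===== PORT A =====
-- the loop body: buf is kept as a List Char (Python builds the string char by char)
def makeFastaStep (st : List String × List Char) (c : Char) : List String × List Char :=
  if st.2.length < 60 then (st.1, st.2 ++ [c]) else (st.1 ++ [String.mk st.2], [])

def makeFasta (label : String) (sequence : String) : List String :=
  let label := ">" ++ label
  let fasta := [label]
  let st := sequence.toList.foldl makeFastaStep (fasta, ([] : List Char))
  st.1 ++ [String.mk st.2]

-- ===== PORT B =====
-- the while loop of Source B; sequence[i:i+60] = (drop i).take 60 and sequence[i:] = drop i (i is always ≥ 0 here)
def makeFastaAltGo (s : List Char) (i : Nat) : List String :=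
  if i + 60 < s.length then
    String.mk ((s.drop i).take 60) :: makeFastaAltGo s (i + 61)
  else
    [String.mk (s.drop i)]
termination_by s.length - i

def makeFasta_alt (label : String) (sequence : String) : List String :=
  (">" ++ label) :: makeFastaAltGo sequence.toList 0

-- ===== PRECONDITION & SPEC =====
def Spec_makeFasta (label : String) (sequence : String) (out : List String) : Prop := out = makeFasta_alt label sequence
instance (label : String) (sequence : String) (out : List String) : Decidable (Spec_makeFasta label sequence out) := by unfold Spec_makeFasta; infer_instance

-- ===== CLAIM (what is proved, stated in full; the proofs are below) =====
def Claim_equal_makeFasta : Prop := ∀ (label : String) (sequence : String), Dom_makeFasta label sequence → Spec_makeFasta label sequence (makeFasta label sequence)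

-- ===== LEMMAS AND PROOFS =====

-- proof-only helper: B's loop rebased to the remaining suffix of the sequence
def chunks (s : List Char) : List String :=
  if 60 < s.length then String.mk (s.take 60) :: chunks (s.drop 61)
  else [String.mk s]
termination_by s.length
decreasing_by simp; omega

lemma makeFastaAltGo_eq_chunks (s : List Char) (i : Nat) :
    makeFastaAltGo s i = chunks (s.drop i) := by
  fun_induction makeFastaAltGo s i with
  | case1 i h ih =>
    rw [chunks, if_pos (show 60 < (s.drop i).length by simp; omega),
      ih, List.drop_drop]
  | case2 i h =>
    rw [chunks, if_neg (show ¬ 60 < (s.drop i).length by simp; omega)]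

lemma foldl_step_eq_chunks (s : List Char) (acc : List String) (buf : List Char)
    (hbuf : buf.length ≤ 60) :
    (s.foldl makeFastaStep (acc, buf)).1 ++ [String.mk (s.foldl makeFastaStep (acc, buf)).2]
      = acc ++ chunks (buf ++ s) := by
  induction s generalizing acc buf with
  | nil =>
    rw [List.foldl_nil, chunks, if_neg (by simp; omega)]
    simp
  | cons c s ih =>
    by_cases h : buf.length < 60
    · rw [List.foldl_cons, makeFastaStep, if_pos h, ih acc (buf ++ [c]) (by simp; omega)]
      simp
    · have h60 : buf.length = 60 := by omega
      have ht : (buf ++ c :: s).take 60 = buf := by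
        rw [List.take_append_of_le_length (by omega), List.take_of_length_le (by omega)]
      have hd : (buf ++ c :: s).drop 61 = s := by
        rw [show 61 = buf.length + 1 from by omega, List.drop_append]
        simp
      have hrhs : chunks (buf ++ c :: s) = String.mk buf :: chunks s := by
        rw [chunks, if_pos (by simp; omega), ht, hd]
      rw [List.foldl_cons, makeFastaStep, if_neg h,
        ih (acc ++ [String.mk buf]) [] (by simp), hrhs]
      simp

-- ===== VERDICT (by name: the statement is the Claim_ definition above) =====
theorem makeFasta_spec : Claim_equal_makeFasta := by
  intro label sequence _
  unfold Spec_makeFasta makeFasta makeFasta_alt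
  rw [makeFastaAltGo_eq_chunks]
  simpa using foldl_step_eq_chunks sequence.toList [">" ++ label] [] (by simp)
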